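-- pv_equiv track=rewrite | github.com/dafyddstephenson/ucla-roms | Tools-Roms/mpc/passes/f77_to_f95.py | _fix_character
-- ===== SOURCE A (Python) =====
-- def _first_nonblank(text):
--     """Return the index of the first non-space/tab character."""
--     i = 0
--     while i < len(text) and text[i] in (" ", "\t"):
--         i += 1
--     return i
--
-- def _next_token_end(text, start, terminators=(" ", "\t", ",", ")")):
--     """
--     Scan forward from 'start' until reaching any terminator character.
--     Returns the index just past the end of the token.
--     """
--     i = start
--     while i < len(text) and text[i] not in terminators:
--         i += 1
--     return i
--
-- def _fix_character(text):
--     """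
--     CHARACTER*X        → CHARACTER(len=X)
--     CHARACTER*(X)      → CHARACTER(len=X)
--     CHARACTER(len=...) → unchanged
--     CHARACTER default  → unchanged (no default length)
--
--     X may be numeric or a macro name. Behavior matches original MPC logic.
--     """
--     l = len(text)
--     istr = _first_nonblank(text)
--     if istr + 8 >= l:
--         return text
--
--     # must begin with CHARACTER
--     if text[istr:istr+9].lower() != "character":
--         return text
--
--     i = istr + 8        # index of 'R' in CHARACTER
--     j = i + 1
--
--     # skip blanks
--     while j < l and text[j] == " ":
--         j += 1
--
--     # CASE 1: CHARACTER*(...)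
--     if j < l and text[j] == "*":
--         k = j + 1
--
--         # parenthesized form: CHARACTER*(something)
--         if k < l and text[k] == "(":
--             k2 = k + 1
--             # accept any content until ')'
--             while k2 < l and text[k2] != ")":
--                 k2 += 1
--             if k2 < l and text[k2] == ")":
--                 size = text[k+1:k2]
--                 end = k2 + 1
--                 return text[:i+1] + f"(len={size})" + text[end:]
--             return text
--
--         # CASE 2: CHARACTER*something (simple token until space, tab, ',', ')')
--         k2 = _next_token_end(text, k)
--         size = text[k:k2]
--         if size:
--             return text[:i+1] + f"(len={size})" + text[k2:]
--         return text
--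
--     # CASE 3: CHARACTER(...)
--     if j < l and text[j] == "(":
--         return text  # already F90 style
--
--     # CASE 4: default CHARACTER → unchanged (no default length added)
--     return text
-- ===== SOURCE B (Python) =====
-- KEYWORD = "character"
--
-- def _fix_character(text):
--     # Single-pass DFA over the characters with an explicit state variable,
--     # instead of staged index scans.
--     LEAD, KEY, GAP, STAR, PAREN, TOKEN = range(6)
--     state = LEAD
--     nmatch = 0
--     head = 0
--     size = []
--     for pos, ch in enumerate(text):
--         if state == LEAD and ch not in " \t":
--             state = KEY
--         if state == LEAD:
--             pass
--         elif state == KEY: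
--             if ch.lower() != KEYWORD[nmatch]:
--                 return text
--             nmatch += 1
--             if nmatch == 9:
--                 state, head = GAP, pos + 1
--         elif state == GAP:
--             if ch == "*":
--                 state = STAR
--             elif ch != " ":
--                 return text
--         elif state == STAR:
--             if ch == "(":
--                 state = PAREN
--             elif ch in " \t,)":
--                 return text
--             else:
--                 state = TOKEN
--                 size.append(ch)
--         elif state == PAREN:
--             if ch == ")":
--                 return text[:head] + f"(len={''.join(size)})" + text[pos + 1:]
--             size.append(ch)
--         else:  # TOKEN
--             if ch in " \t,)":
--                 return text[:head] + f"(len={''.join(size)})" + text[pos:]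
--             size.append(ch)
--     if state == TOKEN:
--         return text[:head] + f"(len={''.join(size)})"
--     return text
-- ===== Notes on version B (the rewrite author's own statement) =====
-- stated objective: alternative
-- what changed: Replaces A's staged index-scanning passes (four separate while-loops plus slice bookkeeping over positions) with a single left-to-right pass: an explicit six-state finite-state machine (LEAD/KEY/GAP/STAR/PAREN/TOKEN) driven by one enumerate loop that accumulates the size and rebuilds the line when it reaches an accepting transition.
import Mathlib
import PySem

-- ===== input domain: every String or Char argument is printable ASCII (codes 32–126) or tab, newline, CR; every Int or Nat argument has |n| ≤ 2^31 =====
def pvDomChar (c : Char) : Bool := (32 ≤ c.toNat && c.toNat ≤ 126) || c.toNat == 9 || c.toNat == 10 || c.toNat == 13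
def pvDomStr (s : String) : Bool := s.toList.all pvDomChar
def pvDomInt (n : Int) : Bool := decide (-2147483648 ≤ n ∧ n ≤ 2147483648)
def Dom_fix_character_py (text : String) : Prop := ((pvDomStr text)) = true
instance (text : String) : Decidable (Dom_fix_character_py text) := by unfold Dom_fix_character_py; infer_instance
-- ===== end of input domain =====

-- B replaces A's staged index-scanning passes by a single left-to-right pass: an
-- explicit finite-state machine over the characters (alternative; same cost).

-- ===== PORT A =====
-- generic "while i < len(text) and p(text[i]): i += 1" index loop (all four loops of A have this shape)
def pvWhileIdx (p : Char → Bool) (cs : List Char) (i : Nat) : Nat :=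
  if h : i < cs.length then
    if p cs[i] then pvWhileIdx p cs (i + 1) else i
  else i
termination_by cs.length - i

-- _first_nonblank
def pvFirstNonblank (cs : List Char) : Nat :=
  pvWhileIdx (fun c => c == ' ' || c == '\t') cs 0

-- _next_token_end (with the default terminators, the only way A calls it)
def pvNextTokenEnd (cs : List Char) (start : Nat) : Nat :=
  pvWhileIdx (fun c => !(c == ' ' || c == '\t' || c == ',' || c == ')')) cs start

def fix_character_py (text : String) : String :=
  let cs := text.toList
  let l := cs.length
  let istr := pvFirstNonblank cs
  if istr + 8 ≥ l then text
  else if PySem.Chars.lower (PySem.List.slice cs (some (istr : Int)) (some ((istr + 9 : Nat) : Int))) ≠ "character".toList then text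
  else
    let i := istr + 8
    let j := pvWhileIdx (fun c => c == ' ') cs (i + 1)
    if cs[j]? = some '*' then
      let k := j + 1
      if cs[k]? = some '(' then
        let k2 := pvWhileIdx (fun c => !(c == ')')) cs (k + 1)
        if cs[k2]? = some ')' then
          let size := PySem.List.slice cs (some ((k + 1 : Nat) : Int)) (some ((k2 : Nat) : Int))
          String.ofList (PySem.List.slice cs none (some ((i + 1 : Nat) : Int)) ++ "(len=".toList ++ size ++ [')'] ++ PySem.List.slice cs (some ((k2 + 1 : Nat) : Int)) none)
        else text
      else
        let k2 := pvNextTokenEnd cs k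
        let size := PySem.List.slice cs (some ((k : Nat) : Int)) (some ((k2 : Nat) : Int))
        if size ≠ [] then
          String.ofList (PySem.List.slice cs none (some ((i + 1 : Nat) : Int)) ++ "(len=".toList ++ size ++ [')'] ++ PySem.List.slice cs (some ((k2 : Nat) : Int)) none)
        else text
    else if cs[j]? = some '(' then text
    else text

-- ===== PORT B =====
-- KEYWORD
def pvKw : List Char := "character".toList

-- the DFA states of Source B's loop (LEAD/KEY/GAP/STAR/PAREN/TOKEN, with their carried data)
inductive PvSt : Type
  | lead : PvSt
  | key : Nat → PvSt                     -- nmatch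
  | gap : Nat → PvSt                     -- head
  | star : Nat → PvSt
  | paren : Nat → List Char → PvSt       -- head, size
  | token : Nat → List Char → PvSt
deriving DecidableEq, Repr

-- text[:head] + f"(len={''.join(size)})" + suffix
def pvBuild (cs : List Char) (head : Nat) (size : List Char) (rest : List Char) : String :=
  String.ofList (cs.take head ++ "(len=".toList ++ size ++ [')'] ++ rest)

-- Source B's 'for pos, ch in enumerate(text)' loop, one recursive step per character
def pvRun (text : String) (cs : List Char) (pos : Nat) (st : PvSt) : List Char → String
  | [] =>
    match st with
    | .token h sz => pvBuild cs h sz []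
    | _ => text
  | ch :: rs =>
    match st with
    | .lead =>
      if ch == ' ' || ch == '\t' then pvRun text cs (pos + 1) .lead rs
      else
        -- Python sets state = KEY and falls through to the KEY step in the same iteration
        match pvKw[0]? with
        | none => text
        | some k =>
          if PySem.Chars.lowerChar ch == k then
            if (0 : Nat) == 8 then pvRun text cs (pos + 1) (.gap (pos + 1)) rs
            else pvRun text cs (pos + 1) (.key 1) rs
          else text
    | .key n =>
      match pvKw[n]? with
      | none => text   -- unreachable: n ≤ 8 in every reachable KEY state
      | some k =>
        if PySem.Chars.lowerChar ch == k then
          if n == 8 then pvRun text cs (pos + 1) (.gap (pos + 1)) rs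
          else pvRun text cs (pos + 1) (.key (n + 1)) rs
        else text
    | .gap h =>
      if ch == '*' then pvRun text cs (pos + 1) (.star h) rs
      else if ch == ' ' then pvRun text cs (pos + 1) (.gap h) rs
      else text
    | .star h =>
      if ch == '(' then pvRun text cs (pos + 1) (.paren h []) rs
      else if ch == ' ' || ch == '\t' || ch == ',' || ch == ')' then text
      else pvRun text cs (pos + 1) (.token h [ch]) rs
    | .paren h sz =>
      if ch == ')' then pvBuild cs h sz rs
      else pvRun text cs (pos + 1) (.paren h (sz ++ [ch])) rs
    | .token h sz =>
      if ch == ' ' || ch == '\t' || ch == ',' || ch == ')' then pvBuild cs h sz (ch :: rs)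
      else pvRun text cs (pos + 1) (.token h (sz ++ [ch])) rs

def fix_character_py_alt (text : String) : String :=
  pvRun text text.toList 0 .lead text.toList

-- ===== PRECONDITION & SPEC =====
def Spec_fix_character_py (text : String) (out : String) : Prop := out = fix_character_py_alt text
instance (text : String) (out : String) : Decidable (Spec_fix_character_py text out) := by unfold Spec_fix_character_py; infer_instance

-- ===== CLAIM (what is proved, stated in full; the proofs are below) =====
def Claim_equal_fix_character_py : Prop := ∀ (text : String), Dom_fix_character_py text → Spec_fix_character_py text (fix_character_py text)

-- ===== LEMMAS AND PROOFS =====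

-- the index loop computes start + length of the matching span
theorem pvWhileIdx_eq (p : Char → Bool) (cs : List Char) (i : Nat) :
    pvWhileIdx p cs i = i + ((cs.drop i).takeWhile p).length := by
  have H : ∀ (n : Nat) (i : Nat), cs.length - i ≤ n →
      pvWhileIdx p cs i = i + ((cs.drop i).takeWhile p).length := by
    intro n
    induction n with
    | zero =>
      intro i h
      have hle : cs.length ≤ i := by omega
      rw [pvWhileIdx]
      simp [List.drop_eq_nil_of_le hle, Nat.not_lt_of_le hle]
    | succ n ih =>
      intro i h
      rw [pvWhileIdx]
      by_cases hi : i < cs.length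
      · rw [List.drop_eq_getElem_cons hi, List.takeWhile_cons]
        by_cases hp : p cs[i]
        · simp only [hi, dif_pos, hp, if_pos, ih (i + 1) (by omega)]
          simp
          omega
        · simp [hi, hp]
      · simp [hi, List.drop_eq_nil_of_le (by omega : cs.length ≤ i)]
  exact H (cs.length - i) i (le_refl _)

theorem drop_takeWhile_length (p : Char → Bool) (cs : List Char) :
    cs.drop (cs.takeWhile p).length = cs.dropWhile p := by
  induction cs with
  | nil => simp
  | cons c cs ih =>
    by_cases hp : p c
    · simp [hp, ih]
    · simp [hp]

theorem take_takeWhile_length (p : Char → Bool) (cs : List Char) :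
    cs.take (cs.takeWhile p).length = cs.takeWhile p := by
  induction cs with
  | nil => simp
  | cons c cs ih =>
    by_cases hp : p c
    · simp [hp, ih]
    · simp [hp]

theorem head_dropWhile_false (p : Char → Bool) (cs : List Char) (y : Char) (ys : List Char)
    (h : cs.dropWhile p = y :: ys) : p y = false := by
  induction cs with
  | nil => simp at h
  | cons c cs ih =>
    by_cases hp : p c
    · exact ih (by simpa [List.dropWhile_cons, hp] using h)
    · rw [List.dropWhile_cons, if_neg (by simp [hp])] at h
      cases h
      simpa using hp

theorem span_drop (p : Char → Bool) (cs xs : List Char) (a : Nat) (h : cs.drop a = xs) :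
    cs.drop (a + (xs.takeWhile p).length) = xs.dropWhile p := by
  rw [← drop_takeWhile_length p xs, ← h, List.drop_drop]

theorem drop_succ_cons (cs : List Char) (a : Nat) (c : Char) (xs : List Char)
    (h : cs.drop a = c :: xs) : cs.drop (a + 1) = xs := by
  have h2 : (cs.drop a).drop 1 = cs.drop (a + 1) := List.drop_drop ..
  rw [← h2, h]; rfl

theorem getElem?_eq_of_drop (cs xs : List Char) (a : Nat) (h : cs.drop a = xs) :
    cs[a]? = xs[0]? := by
  rw [← h]; simp [List.getElem?_drop]

-- ---- normal forms of the DFA's tail states (proof helpers) ----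

def pvStarNF (text : String) (cs : List Char) (h : Nat) : List Char → String
  | [] => text
  | d :: ds =>
    if d == '(' then
      if ds.dropWhile (fun c => !(c == ')')) = [] then text
      else pvBuild cs h (ds.takeWhile (fun c => !(c == ')'))) ((ds.dropWhile (fun c => !(c == ')'))).tail)
    else if d == ' ' || d == '\t' || d == ',' || d == ')' then text
    else pvBuild cs h (d :: ds.takeWhile (fun c => !(c == ' ' || c == '\t' || c == ',' || c == ')')))
      (ds.dropWhile (fun c => !(c == ' ' || c == '\t' || c == ',' || c == ')')))

def pvGapNF (text : String) (cs : List Char) (h : Nat) (rest : List Char) : String :=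
  match rest.dropWhile (fun c => c == ' ') with
  | [] => text
  | c :: rs => if c == '*' then pvStarNF text cs h rs else text

theorem pvRun_token (text : String) (cs : List Char) :
    ∀ (rest acc : List Char) (pos h : Nat),
      pvRun text cs pos (.token h acc) rest =
        pvBuild cs h (acc ++ rest.takeWhile (fun c => !(c == ' ' || c == '\t' || c == ',' || c == ')')))
          (rest.dropWhile (fun c => !(c == ' ' || c == '\t' || c == ',' || c == ')'))) := by
  intro rest
  induction rest with
  | nil => intro acc pos h; simp only [List.takeWhile_nil, List.dropWhile_nil, List.append_nil, pvRun]
  | cons ch rs ih =>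
    intro acc pos h
    by_cases hc : (ch == ' ' || ch == '\t' || ch == ',' || ch == ')') = true
    · have hpred : (!(ch == ' ' || ch == '\t' || ch == ',' || ch == ')')) = false := by simp [hc]
      simp only [List.takeWhile_cons, List.dropWhile_cons, hpred, Bool.false_eq_true, if_false,
        List.append_nil]
      simp [pvRun, hc]
    · have hpred : (!(ch == ' ' || ch == '\t' || ch == ',' || ch == ')')) = true := by simp [hc]
      simp only [List.takeWhile_cons, List.dropWhile_cons, hpred, if_true]
      have hstep : pvRun text cs pos (.token h acc) (ch :: rs) =
          pvRun text cs (pos + 1) (.token h (acc ++ [ch])) rs := by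
        simp [pvRun, hc]
      rw [hstep, ih]
      simp [pvBuild]

theorem pvRun_paren (text : String) (cs : List Char) :
    ∀ (rest acc : List Char) (pos h : Nat),
      pvRun text cs pos (.paren h acc) rest =
        if rest.dropWhile (fun c => !(c == ')')) = [] then text
        else pvBuild cs h (acc ++ rest.takeWhile (fun c => !(c == ')')))
          ((rest.dropWhile (fun c => !(c == ')'))).tail) := by
  intro rest
  induction rest with
  | nil => intro acc pos h; simp [pvRun]
  | cons ch rs ih =>
    intro acc pos h
    by_cases hc : ch = ')'
    · subst hc; simp [pvRun]
    · simp [pvRun, hc, ih]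

theorem pvRun_star (text : String) (cs : List Char) (rest : List Char) (pos h : Nat) :
    pvRun text cs pos (.star h) rest = pvStarNF text cs h rest := by
  cases rest with
  | nil => simp [pvRun, pvStarNF]
  | cons d ds =>
    by_cases hd : d = '('
    · subst hd
      simp [pvRun, pvStarNF, pvRun_paren]
    · by_cases ht : (d == ' ' || d == '\t' || d == ',' || d == ')') = true
      · simp [pvRun, pvStarNF, hd, ht]
      · simp only [Bool.not_eq_true] at ht
        simp [pvRun, pvStarNF, hd, ht, pvRun_token]

theorem pvRun_gap (text : String) (cs : List Char) :
    ∀ (rest : List Char) (pos h : Nat),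
      pvRun text cs pos (.gap h) rest = pvGapNF text cs h rest := by
  intro rest
  induction rest with
  | nil => intro pos h; simp [pvRun, pvGapNF]
  | cons ch rs ih =>
    intro pos h
    by_cases hs : ch = '*'
    · subst hs; simp [pvRun, pvGapNF, pvRun_star]
    · by_cases hb : ch = ' '
      · subst hb; simp [pvRun, pvGapNF, ih]
      · simp [pvRun, pvGapNF, hs, hb]

theorem pvRun_key (text : String) (cs : List Char) :
    ∀ (m : Nat), 1 ≤ m → m ≤ 9 → ∀ (pos : Nat) (rest : List Char),
      pvRun text cs pos (.key (9 - m)) rest =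
        if PySem.Chars.lower (rest.take m) = pvKw.drop (9 - m)
        then pvRun text cs (pos + m) (.gap (pos + m)) (rest.drop m)
        else text := by
  intro m
  induction m with
  | zero => intro h; omega
  | succ m ih =>
    intro _ h9 pos rest
    cases rest with
    | nil =>
      rw [if_neg]
      · simp [pvRun]
      · intro heq
        have := congrArg List.length heq
        simp [PySem.Chars.lower, pvKw] at this
        omega
    | cons ch rs =>
      have hn : (9 : Nat) - (m + 1) = 8 - m := by omega
      have hlt : 8 - m < pvKw.length := by simp [pvKw]; omega
      have hget : pvKw[8 - m]? = some pvKw[8 - m] := List.getElem?_eq_getElem hlt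
      have hdropkw : pvKw.drop (8 - m) = pvKw[8 - m] :: pvKw.drop (8 - m + 1) :=
        List.drop_eq_getElem_cons hlt
      have hlow : PySem.Chars.lower ((ch :: rs).take (m + 1)) =
          PySem.Chars.lowerChar ch :: PySem.Chars.lower (rs.take m) := rfl
      rw [hn, hlow, hdropkw]
      by_cases hch : PySem.Chars.lowerChar ch = pvKw[8 - m]
      · by_cases hm0 : m = 0
        · subst hm0
          have hnil : pvKw.drop (8 - 0 + 1) = [] := by simp [pvKw]
          rw [if_pos (by rw [hnil, ← hch]; simp [PySem.Chars.lower])]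
          simp [pvRun, hget, hch]
        · have h1m : 1 ≤ m := by omega
          have hkeyn : (8 - m == 8) = false := by
            rw [beq_eq_false_iff_ne]; omega
          have hstep : pvRun text cs pos (.key (8 - m)) (ch :: rs) =
              pvRun text cs (pos + 1) (.key (9 - m)) rs := by
            simp only [pvRun, hget, hch, beq_self_eq_true, if_true, hkeyn,
              Bool.false_eq_true, if_false]
            have h5 : 8 - m + 1 = 9 - m := by omega
            rw [h5]
          rw [hstep, ih h1m (by omega) (pos + 1) rs]
          have h5 : 8 - m + 1 = 9 - m := by omega
          rw [h5]
          by_cases htail : PySem.Chars.lower (rs.take m) = pvKw.drop (9 - m)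
          · rw [if_pos htail, if_pos (by rw [htail, hch])]
            have harr : pos + 1 + m = pos + (m + 1) := by omega
            have hdrop : (ch :: rs).drop (m + 1) = rs.drop m := rfl
            rw [harr, hdrop]
          · rw [if_neg htail, if_neg]
            intro hcc
            exact htail (by injection hcc)
      · rw [if_neg]
        · simp [pvRun, hget, hch]
        · intro hcc
          exact hch (by injection hcc)

theorem pvRun_lead_drop (text : String) (cs : List Char) :
    ∀ (rest : List Char) (pos : Nat),
      pvRun text cs pos .lead rest =
        pvRun text cs (pos + (rest.takeWhile (fun c => c == ' ' || c == '\t')).length) .lead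
          (rest.dropWhile (fun c => c == ' ' || c == '\t')) := by
  intro rest
  induction rest with
  | nil => intro pos; simp
  | cons ch rs ih =>
    intro pos
    by_cases hb : (ch == ' ' || ch == '\t') = true
    · simp only [List.takeWhile_cons, List.dropWhile_cons, hb, if_true]
      have hstep : pvRun text cs pos .lead (ch :: rs) = pvRun text cs (pos + 1) .lead rs := by
        simp [pvRun, hb]
      rw [hstep, ih (pos + 1)]
      have harr : pos + 1 + (rs.takeWhile (fun c => c == ' ' || c == '\t')).length =
          pos + (ch :: rs.takeWhile (fun c => c == ' ' || c == '\t')).length := by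
        simp; omega
      rw [harr]
    · simp only [List.takeWhile_cons, List.dropWhile_cons, hb, Bool.false_eq_true, if_false]
      simp

theorem pvRun_lead_nonblank (text : String) (cs : List Char) (c : Char) (rs : List Char) (pos : Nat)
    (hc : (c == ' ' || c == '\t') = false) :
    pvRun text cs pos .lead (c :: rs) = pvRun text cs pos (.key 0) (c :: rs) := by
  simp [pvRun, hc]

-- ---- the main equivalence ----

theorem fix_eq (text : String) : fix_character_py text = fix_character_py_alt text := by
  simp only [fix_character_py, fix_character_py_alt, pvFirstNonblank, pvNextTokenEnd,
    pvWhileIdx_eq, List.drop_zero, Nat.zero_add]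
  set cs := text.toList with hcs
  set p1 : Char → Bool := fun c => c == ' ' || c == '\t' with hp1
  set istr := (cs.takeWhile p1).length with histr
  have hS : cs.drop istr = cs.dropWhile p1 := drop_takeWhile_length p1 cs
  set S := cs.dropWhile p1 with hSdef
  have histr_le : istr ≤ cs.length := by
    rw [histr]; exact (List.takeWhile_sublist (l := cs) (p := p1)).length_le
  have hSlen : S.length = cs.length - istr := by rw [← hS, List.length_drop]
  have hlead : pvRun text cs 0 PvSt.lead cs = pvRun text cs istr PvSt.lead S := by
    rw [pvRun_lead_drop]; rw [← histr, ← hSdef]; simp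
  rw [hlead]
  rcases hSs : S with _ | ⟨c, S'⟩
  · -- all blanks (or empty): both sides return text
    have h0 : S.length = 0 := by rw [hSs]; rfl
    rw [if_pos (by omega)]
    simp [pvRun]
  · have hc : p1 c = false := head_dropWhile_false p1 cs c S' (by rw [← hSdef, hSs])
    rw [pvRun_lead_nonblank text cs c S' istr (by exact hc)]
    have hkey := pvRun_key text cs 9 (by omega) (by omega) istr (c :: S')
    simp only [Nat.sub_self, List.drop_zero] at hkey
    rw [← hSs] at hkey ⊢
    rw [hkey]
    by_cases h1 : istr + 8 ≥ cs.length
    · -- fewer than 9 chars after the blanks: the keyword cannot match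
      rw [if_pos h1, if_neg]
      intro heq
      have := congrArg List.length heq
      simp [PySem.Chars.lower, pvKw] at this
      omega
    · rw [if_neg h1]
      have hslice : PySem.List.slice cs (some (istr : Int)) (some ((istr + 9 : Nat) : Int)) = S.take 9 := by
        rw [PySem.List.slice_natCast, (by omega : istr + 9 - istr = 9), hS]
      rw [hslice]
      have hkwlit : "character".toList = pvKw := rfl
      rw [hkwlit]
      by_cases h2 : PySem.Chars.lower (S.take 9) = pvKw
      · rw [if_neg (by simp [h2]), if_pos h2]
        -- both sides are now at the GAP stage
        rw [pvRun_gap]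
        have hd9 : cs.drop (istr + 8 + 1) = S.drop 9 := by
          rw [← hS, List.drop_drop]
        have ebod := span_drop (fun c => c == ' ') cs (S.drop 9) (istr + 8 + 1) hd9
        have hjq := getElem?_eq_of_drop cs _ _ ebod
        rw [pvGapNF, hd9]
        rcases hbod : (S.drop 9).dropWhile (fun c => c == ' ') with _ | ⟨c2, bs⟩ <;>
          rw [hbod] at ebod hjq
        · -- nothing after the blanks: cs[j]? = none on the A side
          simp only [List.getElem?_nil] at hjq
          rw [if_neg (by simp [hjq]), if_neg (by simp [hjq])]
        · simp only [List.getElem?_cons_zero] at hjq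
          have hdropk := drop_succ_cons cs _ c2 bs ebod
          have hkq := getElem?_eq_of_drop cs _ _ hdropk
          by_cases hc2 : c2 = '*'
          · subst hc2
            rw [if_pos hjq]
            simp only [beq_self_eq_true, if_true]
            rcases hbs : bs with _ | ⟨d, ds⟩ <;> rw [hbs] at hkq hdropk <;>
              simp only [pvStarNF]
            · -- "CHARACTER*" at the very end: empty token on both sides
              simp only [List.getElem?_nil] at hkq
              rw [if_neg (by simp [hkq])]
              rw [if_neg (by
                rw [PySem.List.slice_natCast, hdropk]
                simp [List.takeWhile_nil, List.take_nil])]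
            · simp only [List.getElem?_cons_zero] at hkq
              by_cases hd : d = '('
              · subst hd
                rw [if_pos hkq]
                simp only [beq_self_eq_true, if_true]
                have hdrop2 := drop_succ_cons cs _ '(' ds hdropk
                have erest := span_drop (fun c => !(c == ')')) cs ds _ hdrop2
                have hk2q := getElem?_eq_of_drop cs _ _ erest
                rw [hdrop2]
                rcases hrst : ds.dropWhile (fun c => !(c == ')')) with _ | ⟨e, es⟩ <;>
                  rw [hrst] at erest hk2q
                · simp only [List.getElem?_nil] at hk2q
                  rw [if_neg (by simp [hk2q]), if_pos rfl]
                · simp only [List.getElem?_cons_zero] at hk2q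
                  have he : e = ')' := by
                    have := head_dropWhile_false _ ds e es hrst
                    simpa using this
                  subst he
                  rw [if_pos hk2q, if_neg (by simp)]
                  unfold pvBuild
                  congr 1
                  rw [PySem.List.slice_to_natCast, PySem.List.slice_natCast, PySem.List.slice_from_natCast]
                  have h3 : istr + 8 + 1 + (List.takeWhile (fun c => c == ' ') (S.drop 9)).length + 1 + 1 +
                        (List.takeWhile (fun c => !(c == ')')) ds).length -
                        (istr + 8 + 1 + (List.takeWhile (fun c => c == ' ') (S.drop 9)).length + 1 + 1) =
                        (List.takeWhile (fun c => !(c == ')')) ds).length := by omega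
                  rw [h3, hdrop2, take_takeWhile_length]
                  have htl := drop_succ_cons cs _ ')' es erest
                  rw [htl]
                  simp
              · -- token case: the char after '*' is not '('
                rw [if_neg (by simp [hkq, hd])]
                have h4 : istr + 8 + 1 + (List.takeWhile (fun c => c == ' ') (S.drop 9)).length + 1 +
                    (List.takeWhile (fun c => !(c == ' ' || c == '\t' || c == ',' || c == ')'))
                      (cs.drop (istr + 8 + 1 + (List.takeWhile (fun c => c == ' ') (S.drop 9)).length + 1))).length -
                    (istr + 8 + 1 + (List.takeWhile (fun c => c == ' ') (S.drop 9)).length + 1) =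
                    (List.takeWhile (fun c => !(c == ' ' || c == '\t' || c == ',' || c == ')'))
                      (cs.drop (istr + 8 + 1 + (List.takeWhile (fun c => c == ' ') (S.drop 9)).length + 1))).length := by
                  omega
                rw [PySem.List.slice_natCast, h4, hdropk, take_takeWhile_length]
                by_cases hterm : (d == ' ' || d == '\t' || d == ',' || d == ')') = true
                · -- empty token on both sides
                  have hpd0 : (!(d == ' ' || d == '\t' || d == ',' || d == ')')) = false := by
                    rw [hterm]; rfl
                  have hsz0 : (d :: ds).takeWhile
                      (fun c => !(c == ' ' || c == '\t' || c == ',' || c == ')')) = [] := by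
                    rw [List.takeWhile_cons, hpd0]; simp
                  have hA : ¬((d :: ds).takeWhile
                      (fun c => !(c == ' ' || c == '\t' || c == ',' || c == ')')) ≠ []) := by
                    rw [hsz0]; simp
                  have hB1 : ¬((d == '(') = true) := by simp [hd]
                  rw [if_neg hA, if_neg hB1, if_pos hterm]
                · have hcond : (d == ' ' || d == '\t' || d == ',' || d == ')') = false := by
                    revert hterm
                    cases (d == ' ' || d == '\t' || d == ',' || d == ')') <;> simp
                  have hpd : (!(d == ' ' || d == '\t' || d == ',' || d == ')')) = true := by
                    rw [hcond]; rfl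
                  have hszc : (d :: ds).takeWhile
                      (fun c => !(c == ' ' || c == '\t' || c == ',' || c == ')')) =
                      d :: ds.takeWhile (fun c => !(c == ' ' || c == '\t' || c == ',' || c == ')')) := by
                    rw [List.takeWhile_cons, hpd]; simp
                  have hA : (d :: ds).takeWhile
                      (fun c => !(c == ' ' || c == '\t' || c == ',' || c == ')')) ≠ [] := by
                    rw [hszc]; simp
                  have hB1 : ¬((d == '(') = true) := by simp [hd]
                  have hB2 : ¬((d == ' ' || d == '\t' || d == ',' || d == ')') = true) := hterm
                  rw [if_pos hA, if_neg hB1, if_neg hB2]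
                  unfold pvBuild
                  congr 1
                  rw [PySem.List.slice_to_natCast, PySem.List.slice_from_natCast]
                  rw [span_drop (fun c => !(c == ' ' || c == '\t' || c == ',' || c == ')')) cs (d :: ds) _ hdropk]
                  rw [hszc, List.dropWhile_cons_of_pos (by exact hpd)]
          · rw [if_neg (by simp [hjq, hc2]), ite_self]
            simp [hc2]
      · rw [if_pos (by simp [h2]), if_neg h2]

-- ===== VERDICT (by name: the statement is the Claim_ definition above) =====
theorem fix_character_py_spec : Claim_equal_fix_character_py := by
  intro text _
  exact fix_eq text
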